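-- pv_equiv track=rewrite | github.com/fkie-cad/Logprep | logprep/connector/confluent_kafka/output.py | _get_last_committable_offsets
-- ===== SOURCE A (Python) =====
-- from typing import Optional, DefaultDict
--
-- def _get_last_committable_offsets(
--     sent_offset_backlog: DefaultDict[str, list],
--     delivered_offset_backlog: DefaultDict[str, list],
-- ) -> dict:
--     last_committable = {}
--     for partition, offsets in delivered_offset_backlog.items():
--         if not offsets:
--             continue
--
--         if len(offsets) == 1:
--             last_committable[partition] = offsets[0]
--             continue
--
--         offsets.sort()
--         prev_offset = offsets[0]
--         for offset in offsets[1:]: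
--             if offset > prev_offset + 1:
--                 unexpected_gap = False
--                 for missing_offset in range(prev_offset + 1, offset):
--                     if missing_offset in sent_offset_backlog.get(partition, []):
--                         last_committable[partition] = prev_offset
--                         unexpected_gap = True
--                 if unexpected_gap:
--                     break
--             last_committable[partition] = offset
--             prev_offset = offset
--     return last_committable
-- ===== SOURCE B (Python) =====
-- def _get_last_committable_offsets(
--     sent_offset_backlog,
--     delivered_offset_backlog,
-- ):
--     last_committable = {}
--     for partition, offsets in delivered_offset_backlog.items():
--         if not offsets:
--             continue
--
--         if len(offsets) == 1:
--             last_committable[partition] = offsets[0]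
--             continue
--
--         offsets.sort()
--         sent_sorted = sorted(sent_offset_backlog.get(partition, []))
--         i = 0
--         prev = offsets[0]
--         for offset in offsets[1:]:
--             while i < len(sent_sorted) and sent_sorted[i] <= prev:
--                 i += 1
--             if i < len(sent_sorted) and sent_sorted[i] < offset:
--                 last_committable[partition] = prev
--                 break
--             last_committable[partition] = offset
--             prev = offset
--     return last_committable
-- ===== Notes on version B (the rewrite author's own statement) =====
-- stated objective: faster
-- what changed: Replaces A's per-gap range() walk with an inner membership scan of the sent backlog by a single merge-style two-pointer sweep over a sorted copy of the sent offsets, so no gap is ever enumerated element by element.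
import Mathlib
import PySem

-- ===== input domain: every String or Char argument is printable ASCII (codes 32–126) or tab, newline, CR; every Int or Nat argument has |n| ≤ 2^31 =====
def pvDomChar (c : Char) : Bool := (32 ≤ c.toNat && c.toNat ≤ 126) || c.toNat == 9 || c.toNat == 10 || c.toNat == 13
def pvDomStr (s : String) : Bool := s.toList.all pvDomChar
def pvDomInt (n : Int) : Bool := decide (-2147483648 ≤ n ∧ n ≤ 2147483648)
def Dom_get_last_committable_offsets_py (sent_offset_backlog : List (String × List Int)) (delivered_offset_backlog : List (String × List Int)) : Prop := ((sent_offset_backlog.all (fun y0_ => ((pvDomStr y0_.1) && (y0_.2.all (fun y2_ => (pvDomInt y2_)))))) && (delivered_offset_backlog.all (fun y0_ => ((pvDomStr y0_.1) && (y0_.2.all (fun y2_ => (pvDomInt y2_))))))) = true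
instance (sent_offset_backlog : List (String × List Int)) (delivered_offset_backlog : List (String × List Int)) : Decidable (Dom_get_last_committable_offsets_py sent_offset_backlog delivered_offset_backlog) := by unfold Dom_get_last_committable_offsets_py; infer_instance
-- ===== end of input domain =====

-- B replaces A's per-gap range() membership scan with a merge-style two-pointer sweep over a
-- sorted copy of the sent backlog (faster: no gap is enumerated element by element).
-- Both A and B sort each delivered offsets list in place (caller-visible mutation, identical
-- in both); the equivalence proved here is about the RETURN value.

-- ===== PORT A =====
-- sent_offset_backlog.get(partition, []) — first-match association-list lookup (shared by both ports)
def pvGetSent (sent : List (String × List Int)) (partition : String) : List Int :=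
  (PySem.Dict.mk sent).getD partition []

-- the inner 'for missing_offset in range(prev+1, offset)' loop over (last_committable, unexpected_gap)
def pvGapScanA (sentP : List Int) (partition : String) (prev offset : Int)
    (lc : PySem.Dict String Int) : PySem.Dict String Int × Bool :=
  (PySem.List.pyRange (prev + 1) offset 1).foldl
    (fun acc m => if sentP.contains m then (acc.1.insert partition prev, true) else acc)
    (lc, false)

-- the 'for offset in offsets[1:]' loop, with 'break' as an early return
def pvLoopA (sentP : List Int) (partition : String) :
    List Int → Int → PySem.Dict String Int → PySem.Dict String Int
  | [], _, lc => lc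
  | offset :: rest, prev, lc =>
    if offset > prev + 1 then
      let r := pvGapScanA sentP partition prev offset lc
      if r.2 then r.1
      else pvLoopA sentP partition rest offset (r.1.insert partition offset)
    else pvLoopA sentP partition rest offset (lc.insert partition offset)

def get_last_committable_offsets_py (sent_offset_backlog : List (String × List Int)) (delivered_offset_backlog : List (String × List Int)) : List (String × Int) :=
  (delivered_offset_backlog.foldl
    (fun lc pr =>
      let partition := pr.1
      let offsets := pr.2
      if offsets.isEmpty then lc
      else if offsets.length == 1 then lc.insert partition (offsets.headD 0)
      else
        let sortedOff := PySem.List.sorted offsets (fun x => x) false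
        pvLoopA (pvGetSent sent_offset_backlog partition) partition
          (sortedOff.drop 1) (sortedOff.headD 0) lc)
    PySem.Dict.empty).items

-- ===== PORT B =====
-- the 'while i < len(sent_sorted) and sent_sorted[i] <= prev: i += 1' loop
def pvAdvanceB (s : List Int) (prev : Int) (i : Nat) : Nat :=
  if h : i < s.length ∧ s.getD i 0 ≤ prev then pvAdvanceB s prev (i + 1) else i
termination_by s.length - i
decreasing_by omega

-- the 'for offset in offsets[1:]' loop carrying the sent pointer i, with 'break' as early return
def pvLoopB (s : List Int) (partition : String) :
    List Int → Int → Nat → PySem.Dict String Int → PySem.Dict String Int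
  | [], _, _, lc => lc
  | offset :: rest, prev, i, lc =>
    let i' := pvAdvanceB s prev i
    if i' < s.length ∧ s.getD i' 0 < offset then lc.insert partition prev
    else pvLoopB s partition rest offset i' (lc.insert partition offset)

def get_last_committable_offsets_py_alt (sent_offset_backlog : List (String × List Int)) (delivered_offset_backlog : List (String × List Int)) : List (String × Int) :=
  (delivered_offset_backlog.foldl
    (fun lc pr =>
      let partition := pr.1
      let offsets := pr.2
      if offsets.isEmpty then lc
      else if offsets.length == 1 then lc.insert partition (offsets.headD 0)
      else
        let sortedOff := PySem.List.sorted offsets (fun x => x) false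
        let sentSorted := PySem.List.sorted (pvGetSent sent_offset_backlog partition) (fun x => x) false
        pvLoopB sentSorted partition (sortedOff.drop 1) (sortedOff.headD 0) 0 lc)
    PySem.Dict.empty).items

-- ===== PRECONDITION & SPEC =====
def Spec_get_last_committable_offsets_py (sent_offset_backlog : List (String × List Int)) (delivered_offset_backlog : List (String × List Int)) (out : List (String × Int)) : Prop := out = get_last_committable_offsets_py_alt sent_offset_backlog delivered_offset_backlog
instance (sent_offset_backlog : List (String × List Int)) (delivered_offset_backlog : List (String × List Int)) (out : List (String × Int)) : Decidable (Spec_get_last_committable_offsets_py sent_offset_backlog delivered_offset_backlog out) := by unfold Spec_get_last_committable_offsets_py; infer_instance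

-- ===== CLAIM (what is proved, stated in full; the proofs are below) =====
def Claim_equal_get_last_committable_offsets_py : Prop := ∀ (sent_offset_backlog : List (String × List Int)) (delivered_offset_backlog : List (String × List Int)), Dom_get_last_committable_offsets_py sent_offset_backlog delivered_offset_backlog → Spec_get_last_committable_offsets_py sent_offset_backlog delivered_offset_backlog (get_last_committable_offsets_py sent_offset_backlog delivered_offset_backlog)

-- ===== LEMMAS AND PROOFS =====

-- pvAdvanceB only skips elements ≤ prev
lemma pvAdvanceB_le_all (s : List Int) (prev : Int) (i : Nat)
    (hi : ∀ j, j < i → s.getD j 0 ≤ prev) :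
    ∀ j, j < pvAdvanceB s prev i → s.getD j 0 ≤ prev := by
  fun_induction pvAdvanceB s prev i with
  | case1 i h ih =>
    exact ih (by intro j hj; rcases Nat.lt_succ_iff_lt_or_eq.1 hj with h'|h'; exact hi j h'; subst h'; exact h.2)
  | case2 i h => exact fun j hj => hi j hj

-- pvAdvanceB stops at an element > prev (if any index remains)
lemma pvAdvanceB_gt (s : List Int) (prev : Int) (i : Nat) :
    pvAdvanceB s prev i < s.length → prev < s.getD (pvAdvanceB s prev i) 0 := by
  fun_induction pvAdvanceB s prev i with
  | case1 i h ih => exact ih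
  | case2 i h =>
    intro hlen
    simp only [not_and, not_le] at h
    exact h hlen

-- the B-side break test characterised: some sent offset lies strictly between prev and offset
lemma condB_iff (s : List Int) (prev offset : Int) (i : Nat)
    (hs : s.Pairwise (· ≤ ·))
    (hi : ∀ j, j < i → s.getD j 0 ≤ prev) :
    (pvAdvanceB s prev i < s.length ∧ s.getD (pvAdvanceB s prev i) 0 < offset) ↔
      (∃ x ∈ s, prev < x ∧ x < offset) := by
  constructor
  · rintro ⟨hk, hlt⟩
    refine ⟨s.getD (pvAdvanceB s prev i) 0, ?_, pvAdvanceB_gt s prev i hk, hlt⟩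
    rw [List.getD_eq_getElem?_getD, List.getElem?_eq_getElem hk]
    exact List.getElem_mem hk
  · rintro ⟨x, hx, h1, h2⟩
    obtain ⟨m, hm, hmx⟩ := List.mem_iff_getElem.1 hx
    have hkm : pvAdvanceB s prev i ≤ m := by
      by_contra hc
      have := pvAdvanceB_le_all s prev i hi m (by omega)
      rw [List.getD_eq_getElem?_getD, List.getElem?_eq_getElem hm, hmx] at this
      simp only [Option.getD_some] at this
      omega
    have hk : pvAdvanceB s prev i < s.length := lt_of_le_of_lt hkm hm
    refine ⟨hk, ?_⟩
    rcases eq_or_lt_of_le hkm with heq | hlt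
    · rw [List.getD_eq_getElem?_getD, heq, List.getElem?_eq_getElem hm, hmx]; exact h2
    · have := (List.pairwise_iff_getElem.1 hs) _ _ hk hm hlt
      rw [List.getD_eq_getElem?_getD, List.getElem?_eq_getElem hk]
      simp only [Option.getD_some]
      omega

-- a 'latch' fold with an idempotent update: the accumulator becomes (f acc.1, true) iff some element satisfies p
lemma foldl_flag {α : Type} (p : Int → Bool) (f : α → α) (hf : ∀ a, f (f a) = f a) :
    ∀ (l : List Int) (acc : α × Bool),
      l.foldl (fun acc m => if p m then (f acc.1, true) else acc) acc =
        if l.any p then (f acc.1, true) else acc := by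
  intro l
  induction l with
  | nil => intro acc; simp
  | cons a t ih =>
    intro acc
    by_cases hp : p a <;> simp [List.foldl_cons, hp, ih, hf]

-- the A-side gap scan characterised by the same existence condition
lemma pvGapScanA_eq (sentP : List Int) (partition : String) (prev offset : Int)
    (lc : PySem.Dict String Int) :
    pvGapScanA sentP partition prev offset lc =
      if ∃ x ∈ sentP, prev < x ∧ x < offset then (lc.insert partition prev, true)
      else (lc, false) := by
  unfold pvGapScanA
  rw [foldl_flag (fun m => sentP.contains m) (fun d => d.insert partition prev)
        (fun d => PySem.Dict.insert_insert_self d partition prev prev)]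
  by_cases hE : ∃ x ∈ sentP, prev < x ∧ x < offset
  · obtain ⟨x, hx, h1, h2⟩ := id hE
    have hany : (PySem.List.pyRange (prev + 1) offset 1).any (fun m => sentP.contains m) = true := by
      simp only [List.any_eq_true]
      exact ⟨x, PySem.List.mem_pyRange_one.2 ⟨by omega, h2⟩, by simpa using hx⟩
    simp only [hany, if_true]
    rw [if_pos hE]
  · have hany : (PySem.List.pyRange (prev + 1) offset 1).any (fun m => sentP.contains m) = false := by
      simp only [List.any_eq_false]
      intro m hm
      rw [PySem.List.mem_pyRange_one] at hm
      simp only [List.contains_iff_mem]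
      intro hmem
      exact hE ⟨m, hmem, by omega, hm.2⟩
    simp only [hany, Bool.false_eq_true, if_false]
    rw [if_neg hE]

-- the per-partition inner loops agree
lemma loop_eq (sentP : List Int) (partition : String) (rest : List Int) (prev : Int)
    (i : Nat) (lc : PySem.Dict String Int)
    (hchain : (prev :: rest).Pairwise (· ≤ ·))
    (hi : ∀ j, j < i → (PySem.List.sorted sentP (fun x => x) false).getD j 0 ≤ prev) :
    pvLoopA sentP partition rest prev lc =
      pvLoopB (PySem.List.sorted sentP (fun x => x) false) partition rest prev i lc := by
  induction rest generalizing prev i lc with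
  | nil => rfl
  | cons offset rest ih =>
    set s := PySem.List.sorted sentP (fun x => x) false with hsdef
    have hs : s.Pairwise (· ≤ ·) := PySem.List.sorted_pairwise sentP (fun x => x)
    have hmemS : ∀ x : Int, x ∈ s ↔ x ∈ sentP := fun x =>
      PySem.List.mem_sorted sentP (fun x => x) false x
    have hprevoff : prev ≤ offset := (List.pairwise_cons.1 hchain).1 offset (List.mem_cons_self)
    have hcond := condB_iff s prev offset i hs hi
    have hExIff : (∃ x ∈ s, prev < x ∧ x < offset) ↔ (∃ x ∈ sentP, prev < x ∧ x < offset) := by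
      constructor
      · rintro ⟨x, hx, h⟩; exact ⟨x, (hmemS x).mp hx, h⟩
      · rintro ⟨x, hx, h⟩; exact ⟨x, (hmemS x).mpr hx, h⟩
    have hi' : ∀ j, j < pvAdvanceB s prev i → s.getD j 0 ≤ offset :=
      fun j hj => le_trans (pvAdvanceB_le_all s prev i hi j hj) hprevoff
    have hchain' : (offset :: rest).Pairwise (· ≤ ·) := (List.pairwise_cons.1 hchain).2
    show pvLoopA sentP partition (offset :: rest) prev lc =
      pvLoopB s partition (offset :: rest) prev i lc
    rw [pvLoopA, pvLoopB]
    simp only [pvGapScanA_eq]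
    by_cases hE : ∃ x ∈ sentP, prev < x ∧ x < offset
    · -- a sent offset in the gap: both break with lc[partition] = prev
      have hgap : offset > prev + 1 := by
        obtain ⟨x, _, h1, h2⟩ := hE
        omega
      have hcB : pvAdvanceB s prev i < s.length ∧ s.getD (pvAdvanceB s prev i) 0 < offset :=
        hcond.2 (hExIff.2 hE)
      rw [if_pos hgap, if_pos hE, if_pos hcB]
      simp
    · have hcB : ¬ (pvAdvanceB s prev i < s.length ∧ s.getD (pvAdvanceB s prev i) 0 < offset) :=
        fun h => hE (hExIff.1 (hcond.1 h))
      rw [if_neg hcB]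
      by_cases hgap : offset > prev + 1
      · rw [if_pos hgap, if_neg hE]
        exact ih offset (pvAdvanceB s prev i) _ hchain' hi'
      · rw [if_neg hgap]
        exact ih offset (pvAdvanceB s prev i) _ hchain' hi'

-- the per-partition step functions of the two outer folds agree
lemma step_eq (sent : List (String × List Int)) (lc : PySem.Dict String Int)
    (pr : String × List Int) :
    (if pr.2.isEmpty then lc
     else if pr.2.length == 1 then lc.insert pr.1 (pr.2.headD 0)
     else
       let sortedOff := PySem.List.sorted pr.2 (fun x => x) false
       pvLoopA (pvGetSent sent pr.1) pr.1 (sortedOff.drop 1) (sortedOff.headD 0) lc) =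
    (if pr.2.isEmpty then lc
     else if pr.2.length == 1 then lc.insert pr.1 (pr.2.headD 0)
     else
       let sortedOff := PySem.List.sorted pr.2 (fun x => x) false
       let sentSorted := PySem.List.sorted (pvGetSent sent pr.1) (fun x => x) false
       pvLoopB sentSorted pr.1 (sortedOff.drop 1) (sortedOff.headD 0) 0 lc) := by
  by_cases h0 : pr.2.isEmpty
  · simp [h0]
  · rw [if_neg h0, if_neg h0]
    by_cases h1 : pr.2.length == 1
    · rw [if_pos h1, if_pos h1]
    · rw [if_neg h1, if_neg h1]
      have hp : (PySem.List.sorted pr.2 (fun x => x) false).Pairwise (· ≤ ·) :=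
        PySem.List.sorted_pairwise pr.2 (fun x => x)
      cases hso : PySem.List.sorted pr.2 (fun x => x) false with
      | nil => rfl
      | cons a t =>
        show pvLoopA (pvGetSent sent pr.1) pr.1 t a lc = pvLoopB _ pr.1 t a 0 lc
        exact loop_eq (pvGetSent sent pr.1) pr.1 t a 0 lc (hso ▸ hp) (by omega)

-- ===== VERDICT (by name: the statement is the Claim_ definition above) =====
theorem get_last_committable_offsets_py_spec : Claim_equal_get_last_committable_offsets_py := by
  intro sent del hdom
  clear hdom
  show get_last_committable_offsets_py sent del = get_last_committable_offsets_py_alt sent del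
  unfold get_last_committable_offsets_py get_last_committable_offsets_py_alt
  congr 1
  generalize PySem.Dict.empty = lc0
  induction del generalizing lc0 with
  | nil => rfl
  | cons pr rest ih =>
    rw [List.foldl_cons, List.foldl_cons]
    rw [step_eq sent lc0 pr]
    apply ih
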